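-- pv_equiv track=rewrite | github.com/denballakh/simplepatch | simplepatch/converter.py | _unescape_simplepatch_content
-- ===== SOURCE A (Python) =====
-- def _unescape_simplepatch_content(content: str) -> tuple[str, bool]:
--     """Unescape simplepatch content and detect no-newline marker.
--
--     Returns:
--         Tuple of (unescaped content, has_no_newline_marker)
--     """
--     result = []
--     no_newline = False
--     i = 0
--
--     while i < len(content):
--         if content[i] == '^':
--             i += 1
--             if i >= len(content):
--                 break
--             next_char = content[i]
--             if next_char == '0':
--                 pass  # Remove ^0 marker
--             elif next_char == 'r':
--                 result.append('\r')
--             elif next_char == 't':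
--                 result.append('\t')
--             elif next_char == 'x':
--                 no_newline = True
--             elif next_char == '^':
--                 result.append('^')
--         else:
--             result.append(content[i])
--         i += 1
--
--     return ''.join(result), no_newline
-- ===== SOURCE B (Python) =====
-- def _unescape_simplepatch_content(content: str) -> tuple[str, bool]:
--     """Unescape simplepatch content and detect no-newline marker (split-based)."""
--     parts = content.split('^')
--     out = [parts[0]]
--     no_newline = False
--     i = 1
--     while i < len(parts):
--         p = parts[i]
--         if p == '':
--             # '^^' escape: next part follows a literal caret; a trailing lone '^' yields nothing
--             if i + 1 < len(parts):
--                 i += 1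
--                 out.append('^' + parts[i])
--         else:
--             c, rest = p[0], p[1:]
--             if c == 'r':
--                 out.append('\r' + rest)
--             elif c == 't':
--                 out.append('\t' + rest)
--             elif c == 'x':
--                 no_newline = True
--                 out.append(rest)
--             else:  # '0' and unknown escapes: both characters are dropped
--                 out.append(rest)
--         i += 1
--     return ''.join(out), no_newline
-- ===== Notes on version B (the rewrite author's own statement) =====
-- stated objective: faster
-- what changed: Replaces the manual index-by-index character scanner with str.split on the escape character followed by one loop over the resulting parts, interpreting each part's first character as the escaped character.
import Mathlib
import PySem

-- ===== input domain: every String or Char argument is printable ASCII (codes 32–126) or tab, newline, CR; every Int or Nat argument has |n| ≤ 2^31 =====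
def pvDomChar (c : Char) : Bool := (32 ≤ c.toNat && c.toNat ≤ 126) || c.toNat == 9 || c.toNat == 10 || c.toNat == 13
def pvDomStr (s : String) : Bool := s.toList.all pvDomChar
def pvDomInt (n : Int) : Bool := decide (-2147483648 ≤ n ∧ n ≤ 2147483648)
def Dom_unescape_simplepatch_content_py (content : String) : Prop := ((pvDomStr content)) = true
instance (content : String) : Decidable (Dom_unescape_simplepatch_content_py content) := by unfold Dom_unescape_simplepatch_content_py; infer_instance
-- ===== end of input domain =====

-- B replaces A's index-by-index scanner with str.split on the escape character plus one loop over the parts (measurably faster in Python: C-level split).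

-- ===== PORT A =====
-- while-loop of A over the remaining characters: the '^'-branch consumes the next
-- character too; the returned Bool is the final no_newline flag.
def pvGoA : List Char → List Char × Bool
  | [] => ([], false)
  | c :: rest =>
      if c = '^' then
        match rest with
        | [] => ([], false)  -- 'break'
        | d :: rest' =>
            let r := pvGoA rest'
            if d = '0' then r
            else if d = 'r' then ('\r' :: r.1, r.2)
            else if d = 't' then ('\t' :: r.1, r.2)
            else if d = 'x' then (r.1, true)
            else if d = '^' then ('^' :: r.1, r.2)
            else r
      else
        let r := pvGoA rest; (c :: r.1, r.2)

def unescape_simplepatch_content_py (content : String) : String × Bool :=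
  let r := pvGoA content.toList
  (String.mk r.1, r.2)

-- ===== PORT B =====
-- content.split('^') (single-character separator), on the character list
def pvSplitCaret : List Char → List (List Char)
  | [] => [[]]
  | c :: rest =>
      let r := pvSplitCaret rest
      if c = '^' then [] :: r
      else match r with
        | [] => [[c]]  -- unreachable: pvSplitCaret never returns []
        | p :: ps => (c :: p) :: ps

-- B's while-loop over parts[1:]: each part begins right after a '^'
def pvGoB : List (List Char) → List Char × Bool
  | [] => ([], false)
  | [] :: [] => ([], false)  -- trailing lone '^'
  | [] :: q :: ps => let r := pvGoB ps; ('^' :: q ++ r.1, r.2)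
  | (c :: rest) :: ps =>
      let r := pvGoB ps
      if c = 'r' then ('\r' :: rest ++ r.1, r.2)
      else if c = 't' then ('\t' :: rest ++ r.1, r.2)
      else if c = 'x' then (rest ++ r.1, true)
      else (rest ++ r.1, r.2)

def unescape_simplepatch_content_py_alt (content : String) : String × Bool :=
  match pvSplitCaret content.toList with
  | [] => ("", false)  -- unreachable
  | p :: ps => let r := pvGoB ps; (String.mk (p ++ r.1), r.2)

-- ===== PRECONDITION & SPEC =====
def Spec_unescape_simplepatch_content_py (content : String) (out : String × Bool) : Prop := out = unescape_simplepatch_content_py_alt content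
instance (content : String) (out : String × Bool) : Decidable (Spec_unescape_simplepatch_content_py content out) := by unfold Spec_unescape_simplepatch_content_py; infer_instance

-- ===== CLAIM (what is proved, stated in full; the proofs are below) =====
def Claim_equal_unescape_simplepatch_content_py : Prop := ∀ (content : String), Dom_unescape_simplepatch_content_py content → Spec_unescape_simplepatch_content_py content (unescape_simplepatch_content_py content)

-- ===== LEMMAS AND PROOFS =====

-- B's whole computation on a character list
def pvB (l : List Char) : List Char × Bool :=
  match pvSplitCaret l with
  | [] => ([], false)
  | p :: ps => let r := pvGoB ps; (p ++ r.1, r.2)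

theorem pvSplitCaret_ne_nil (l : List Char) : pvSplitCaret l ≠ [] := by
  cases l with
  | nil => simp [pvSplitCaret]
  | cons c rest =>
      simp only [pvSplitCaret]
      split <;> [skip; split] <;> simp

theorem pvB_cons_ne (c : Char) (rest : List Char) (h : ¬ c = '^') :
    pvB (c :: rest) = ((c :: (pvB rest).1), (pvB rest).2) := by
  obtain ⟨p, ps, hs⟩ := List.exists_cons_of_ne_nil (pvSplitCaret_ne_nil rest)
  simp [pvB, pvSplitCaret, h, hs]

theorem pvB_caret_caret (rest : List Char) :
    pvB ('^' :: '^' :: rest) = (('^' :: (pvB rest).1), (pvB rest).2) := by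
  obtain ⟨p, ps, hs⟩ := List.exists_cons_of_ne_nil (pvSplitCaret_ne_nil rest)
  simp [pvB, pvSplitCaret, hs, pvGoB]

theorem pvB_eq_goA_aux : ∀ (n : Nat) (l : List Char), l.length ≤ n → pvB l = pvGoA l := by
  intro n
  induction n with
  | zero =>
      intro l hl
      rw [List.length_eq_zero_iff.mp (Nat.le_zero.mp hl)]
      decide
  | succ n ih =>
      intro l hl
      match l with
      | [] => decide
      | c :: rest =>
        by_cases hc : c = '^'
        · subst hc
          match rest with
          | [] => decide
          | d :: rest' =>
            have hr : pvB rest' = pvGoA rest' := by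
              apply ih; simp at hl; omega
            by_cases hd : d = '^'
            · subst hd
              rw [pvB_caret_caret, hr]
              simp [pvGoA]
            · obtain ⟨p, ps, hs⟩ := List.exists_cons_of_ne_nil (pvSplitCaret_ne_nil rest')
              have hB : pvB rest' = (p ++ (pvGoB ps).1, (pvGoB ps).2) := by
                simp [pvB, hs]
              rw [hB] at hr
              simp only [pvB, pvSplitCaret, if_neg hd, hs]
              simp only [pvGoA, ← hr]
              by_cases h0 : d = '0' <;> by_cases hrr : d = 'r' <;>
                by_cases ht : d = 't' <;> by_cases hx : d = 'x' <;>
                simp_all [pvGoB]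
        · rw [pvB_cons_ne c rest hc]
          have hr : pvB rest = pvGoA rest := by
            apply ih; simp at hl; omega
          rw [hr]
          conv_rhs => rw [pvGoA.eq_def]
          simp [hc]

theorem pvB_eq_goA (l : List Char) : pvB l = pvGoA l :=
  pvB_eq_goA_aux l.length l le_rfl

-- ===== VERDICT (by name: the statement is the Claim_ definition above) =====
theorem unescape_simplepatch_content_py_spec : Claim_equal_unescape_simplepatch_content_py := by
  intro content _
  show _ = _
  unfold unescape_simplepatch_content_py unescape_simplepatch_content_py_alt
  have h := pvB_eq_goA content.toList
  unfold pvB at h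
  cases hs : pvSplitCaret content.toList with
  | nil => exact absurd hs (pvSplitCaret_ne_nil _)
  | cons p ps =>
      rw [hs] at h
      simp only [← h]
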